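-- pv_equiv track=rewrite | github.com/JochenWeerda/VALEO-NeuroERP-1.0.5 | agents/task_handlers.py | _group_dependencies
-- ===== SOURCE A (Python) =====
-- from typing import Dict, List, Optional, Set
--
-- def _group_dependencies(deps: Set[str]) -> Dict[str, Set[str]]:
--     """Gruppiert Abhängigkeiten nach Funktionalität"""
--     groups = {}
--
--     for dep in deps:
--         # Bestimme Gruppe nach Präfix oder Funktionalität
--         if "api" in dep:
--             group = "API"
--         elif "model" in dep:
--             group = "Model"
--         elif "service" in dep:
--             group = "Service"
--         elif "util" in dep:
--             group = "Util"
--         else: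
--             group = "Misc"
--
--         if group not in groups:
--             groups[group] = set()
--         groups[group].add(dep)
--
--     return groups
-- ===== SOURCE B (Python) =====
-- def _group_dependencies(deps):
--     """Gruppiert Abhängigkeiten nach Funktionalität"""
--     table = [("api", "API"), ("model", "Model"), ("service", "Service"), ("util", "Util")]
--     ds = list(deps)
--     labels = [next((lab for kw, lab in table if kw in d), "Misc") for d in ds]
--     order = list(dict.fromkeys(labels))
--     return {lab: {d for d, l in zip(ds, labels) if l == lab} for lab in order}
-- ===== Notes on version B (the rewrite author's own statement) =====
-- stated objective: alternative
-- what changed: Replaces the per-element if/elif chain inserting into a dict with a data-driven keyword table: labels are computed by first-match lookup in the table, the key order is the ordered dedup of the label sequence, and each group is built in one comprehension per category.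
import Mathlib
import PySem

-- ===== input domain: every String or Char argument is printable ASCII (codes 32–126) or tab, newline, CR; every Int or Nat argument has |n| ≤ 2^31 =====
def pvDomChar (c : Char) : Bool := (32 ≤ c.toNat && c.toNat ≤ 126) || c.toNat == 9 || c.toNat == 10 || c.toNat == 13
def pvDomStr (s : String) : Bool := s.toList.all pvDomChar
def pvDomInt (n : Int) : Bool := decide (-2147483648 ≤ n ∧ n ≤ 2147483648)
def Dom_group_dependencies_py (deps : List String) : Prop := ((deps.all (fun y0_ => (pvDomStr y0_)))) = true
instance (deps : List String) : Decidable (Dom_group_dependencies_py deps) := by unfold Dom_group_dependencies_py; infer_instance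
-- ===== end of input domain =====

-- B replaces the per-element if/elif chain with a keyword table, an ordered dedup of the
-- label sequence for the key order, and one per-category comprehension (objective: alternative).
-- A iterates a Python set; equality is stated over the given element order of the list model.

-- ===== PORT A =====
def pvGroupA (dep : String) : String :=
  if PySem.Str.isIn "api" dep then "API"
  else if PySem.Str.isIn "model" dep then "Model"
  else if PySem.Str.isIn "service" dep then "Service"
  else if PySem.Str.isIn "util" dep then "Util"
  else "Misc"

def group_dependencies_py (deps : List String) : List (String × List String) :=
  (deps.foldl
    (fun (groups : PySem.Dict String (PySem.Set String)) dep =>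
      let group := pvGroupA dep
      let groups := if groups.contains group then groups else groups.insert group PySem.Set.empty
      groups.modify group PySem.Set.empty (fun s => PySem.Set.add s dep))
    PySem.Dict.empty).items

-- ===== PORT B =====
def pvTableB : List (String × String) :=
  [("api", "API"), ("model", "Model"), ("service", "Service"), ("util", "Util")]

def pvLabelB (d : String) : String :=
  ((pvTableB.find? (fun p => PySem.Str.isIn p.1 d)).map (·.2)).getD "Misc"

def group_dependencies_py_alt (deps : List String) : List (String × List String) :=
  let labels := deps.map pvLabelB
  let order := PySem.List.dedup labels
  order.map (fun lab =>
    (lab, PySem.Set.ofList (((deps.zip labels).filter (fun p => p.2 == lab)).map (·.1))))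

-- ===== PRECONDITION & SPEC =====
def Spec_group_dependencies_py (deps : List String) (out : List (String × List String)) : Prop := out = group_dependencies_py_alt deps
instance (deps : List String) (out : List (String × List String)) : Decidable (Spec_group_dependencies_py deps out) := by unfold Spec_group_dependencies_py; infer_instance

-- ===== CLAIM (what is proved, stated in full; the proofs are below) =====
def Claim_equal_group_dependencies_py : Prop := ∀ (deps : List String), Dom_group_dependencies_py deps → Spec_group_dependencies_py deps (group_dependencies_py deps)

-- ===== LEMMAS AND PROOFS =====

theorem pv_label_eq (d : String) : pvLabelB d = pvGroupA d := by
  unfold pvLabelB pvTableB pvGroupA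
  simp only [List.find?]
  cases h1 : PySem.Str.isIn "api" d <;>
    cases h2 : PySem.Str.isIn "model" d <;>
      cases h3 : PySem.Str.isIn "service" d <;>
        cases h4 : PySem.Str.isIn "util" d <;>
          simp_all

-- map fst of the filtered zip is a plain filter by label
theorem pv_zip_filter (xs : List String) (lab : String) :
    (((xs.zip (xs.map pvLabelB)).filter (fun p => p.2 == lab)).map (·.1))
      = xs.filter (fun x => pvGroupA x == lab) := by
  induction xs with
  | nil => rfl
  | cons x xs ih =>
      simp only [List.map_cons, List.zip_cons_cons, List.filter_cons]
      rw [pv_label_eq]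
      cases h : pvGroupA x == lab <;> simp_all

-- canonical grouped form
def pvGrouped (xs : List String) : List (String × List String) :=
  (PySem.List.dedup (xs.map pvGroupA)).map
    (fun lab => (lab, PySem.Set.ofList (xs.filter (fun x => pvGroupA x == lab))))

theorem pv_alt_eq_grouped (xs : List String) :
    group_dependencies_py_alt xs = pvGrouped xs := by
  unfold group_dependencies_py_alt pvGrouped
  have hm : xs.map pvLabelB = xs.map pvGroupA := List.map_congr_left (fun x _ => pv_label_eq x)
  simp only [hm]
  refine List.map_congr_left (fun lab _ => ?_)
  rw [← hm, pv_zip_filter]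

theorem pv_A_eq_grouped (xs : List String) :
    (xs.foldl
      (fun (groups : PySem.Dict String (PySem.Set String)) dep =>
        let group := pvGroupA dep
        let groups := if groups.contains group then groups else groups.insert group PySem.Set.empty
        groups.modify group PySem.Set.empty (fun s => PySem.Set.add s dep))
      PySem.Dict.empty)
      = PySem.Dict.mk (pvGrouped xs) := by
  induction xs using List.reverseRecOn with
  | nil => rfl
  | append_singleton ys d ih =>
      rw [List.foldl_append, ih]
      simp only [List.foldl_cons, List.foldl_nil]
      by_cases hmem : pvGroupA d ∈ ys.map pvGroupA
      · -- the label of d was already a key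
        have hg : pvGroupA d ∈ PySem.List.dedup (ys.map pvGroupA) := by
          simpa [PySem.List.mem_dedup] using hmem
        have hcont : (PySem.Dict.mk (pvGrouped ys)).contains (pvGroupA d) = true := by
          simp only [PySem.Dict.contains, pvGrouped, List.any_map,
            List.any_eq_true, Function.comp]
          exact ⟨_, hg, by simp⟩
        have hkeys : (PySem.Dict.mk (pvGrouped ys)).keys
            = PySem.List.dedup (ys.map pvGroupA) := by
          simp [PySem.Dict.keys, pvGrouped, List.map_map, Function.comp_def]
        have hnodup : (PySem.Dict.mk (pvGrouped ys)).keys.Nodup := by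
          rw [hkeys]; exact PySem.List.nodup_dedup (ys.map pvGroupA)
        have hitem : (pvGroupA d,
            PySem.Set.ofList (ys.filter (fun x => pvGroupA x == pvGroupA d))) ∈
            (PySem.Dict.mk (pvGrouped ys)).items :=
          List.mem_map.mpr ⟨_, hg, rfl⟩
        have hgetD := PySem.Dict.getD_of_mem_items _ hitem hnodup PySem.Set.empty
        have hded : PySem.List.dedup (ys.map pvGroupA ++ [pvGroupA d])
            = PySem.List.dedup (ys.map pvGroupA) := by
          simp only [PySem.List.dedup_eq_ofList, PySem.Set.ofList_append_singleton]
          exact PySem.Set.add_of_mem (by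
            simpa [PySem.Set.mem_ofList] using hmem)
        simp only [hcont, if_true, PySem.Dict.modify, hgetD]
        apply PySem.Dict.ext
        rw [PySem.Dict.items_insert_of_contains _ _ hcont]
        simp only [pvGrouped, List.map_append, List.map_cons, List.map_nil, hded,
          List.map_map]
        refine List.map_congr_left (fun lab hlab => ?_)
        simp only [Function.comp]
        by_cases hl : lab = pvGroupA d
        · subst hl
          simp [List.filter_append, PySem.Set.ofList_append_singleton]
        · have : (lab == pvGroupA d) = false := by simp [hl]
          simp [this, List.filter_append, beq_false_of_ne (Ne.symm hl)]
      · -- a fresh label: the key is appended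
        have hg : pvGroupA d ∉ PySem.List.dedup (ys.map pvGroupA) := by
          simpa [PySem.List.mem_dedup] using hmem
        have hcont : (PySem.Dict.mk (pvGrouped ys)).contains (pvGroupA d) = false := by
          simp only [PySem.Dict.contains, pvGrouped, List.any_map, Function.comp_def]
          rw [List.any_eq_false]
          intro lab hlab
          simp only [beq_iff_eq]
          intro h
          exact hg (h ▸ hlab)
        simp only [hcont, if_false, Bool.false_eq_true, PySem.Dict.modify,
          PySem.Dict.getD_insert_self, PySem.Dict.insert_insert_self]
        apply PySem.Dict.ext
        rw [PySem.Dict.items_insert_of_not_contains _ _ hcont]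
        have hded : PySem.List.dedup (ys.map pvGroupA ++ [pvGroupA d])
            = PySem.List.dedup (ys.map pvGroupA) ++ [pvGroupA d] := by
          simp only [PySem.List.dedup_eq_ofList, PySem.Set.ofList_append_singleton]
          exact PySem.Set.add_of_not_mem (by
            simpa [PySem.Set.mem_ofList] using hmem)
        simp only [pvGrouped, List.map_append, List.map_cons, List.map_nil, hded]
        congr 1
        · refine List.map_congr_left (fun lab hlab => ?_)
          have hne : (pvGroupA d == lab) = false := by
            refine beq_false_of_ne (fun h => ?_)
            exact hg (h ▸ hlab)
          simp [List.filter_append, hne]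
        · have hnil : ys.filter (fun x => pvGroupA x == pvGroupA d) = [] := by
            refine List.filter_eq_nil_iff.mpr (fun x hx => ?_)
            simp only [beq_iff_eq]
            intro h
            exact hmem (List.mem_map.mpr ⟨x, hx, h⟩)
          simp [List.filter_append, hnil, PySem.Set.ofList, PySem.Set.add,
            PySem.Set.empty]

-- ===== VERDICT (by name: the statement is the Claim_ definition above) =====
theorem group_dependencies_py_spec : Claim_equal_group_dependencies_py := by
  intro deps _
  unfold Spec_group_dependencies_py
  rw [pv_alt_eq_grouped]
  show (PySem.Dict.items _) = _
  rw [pv_A_eq_grouped]
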